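-- pv_equiv track=rewrite | github.com/heyoon2j/y2-devops-lab | codingTest/Starter/day9.py | solution
-- ===== SOURCE A (Python) =====
-- def solution(hp):
--     answer = 0
--     antAttack = [5, 3, 1]
--     if hp == 0:
--         return answer
--
--     for i in antAttack:
--         answer += hp % i
--         hp //= i
--
--     return answer
-- ===== SOURCE B (Python) =====
-- # Period-15 table lookup: the result only depends on hp mod 15.
-- _TABLE = [r % 5 + r // 5 for r in range(15)]
--
-- def solution(hp):
--     # hp = 15*q + r with r = hp % 15 in [0,15); then hp % 5 = r % 5 and
--     # (hp // 5) % 3 = r // 5 (since hp // 5 = 3*q + r//5 and r//5 < 3),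
--     # so the loop's accumulated value is a function of r alone.
--     return _TABLE[hp % 15]
-- ===== Notes on version B (the rewrite author's own statement) =====
-- stated objective: alternative
-- what changed: Replaced the loop of divmods over [5,3,1] by the observation that the result is periodic with period 15, so B is a single lookup of hp % 15 in a 15-entry precomputed table.
import Mathlib
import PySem

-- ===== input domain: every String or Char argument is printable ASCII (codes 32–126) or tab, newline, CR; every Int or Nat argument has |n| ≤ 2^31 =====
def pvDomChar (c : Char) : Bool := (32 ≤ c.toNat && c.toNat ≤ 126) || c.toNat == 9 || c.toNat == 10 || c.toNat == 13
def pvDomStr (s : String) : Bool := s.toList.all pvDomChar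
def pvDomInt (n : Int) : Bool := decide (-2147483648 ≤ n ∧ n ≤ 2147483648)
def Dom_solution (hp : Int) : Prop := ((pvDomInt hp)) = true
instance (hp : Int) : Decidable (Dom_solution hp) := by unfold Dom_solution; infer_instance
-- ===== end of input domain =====

-- B replaces A's loop of divmods over [5,3,1] with a lookup of hp % 15 in a precomputed 15-entry table (the result is periodic with period 15).
-- ===== PORT A =====
def solution (hp : Int) : Int :=
  let answer : Int := 0
  let antAttack : List Int := [5, 3, 1]
  if hp = 0 then answer
  else
    let st := antAttack.foldl (fun (s : Int × Int) i => (s.1 + PySem.Int.mod s.2 i, PySem.Int.floordiv s.2 i)) (answer, hp)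
    st.1

-- ===== PORT B =====
-- _TABLE = [r % 5 + r // 5 for r in range(15)]
def pvTable : List Int :=
  (PySem.List.pyRange 0 15 1).map (fun r => PySem.Int.mod r 5 + PySem.Int.floordiv r 5)

-- _TABLE[hp % 15]; the index is always in range, so the in-range lookup is exact
def solution_alt (hp : Int) : Int :=
  (PySem.List.pyGet? pvTable (PySem.Int.mod hp 15)).getD 0

-- ===== PRECONDITION & SPEC =====
def Spec_solution (hp : Int) (out : Int) : Prop := out = solution_alt hp
instance (hp : Int) (out : Int) : Decidable (Spec_solution hp out) := by unfold Spec_solution; infer_instance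

-- ===== CLAIM (what is proved, stated in full; the proofs are below) =====
def Claim_equal_solution : Prop := ∀ (hp : Int), Dom_solution hp → Spec_solution hp (solution hp)

-- ===== LEMMAS AND PROOFS =====

lemma pvTable_lookup (r : Int) (h0 : 0 ≤ r) (h15 : r < 15) :
    (PySem.List.pyGet? pvTable r).getD 0 = r % 5 + r / 5 := by
  interval_cases r <;> decide

-- ===== VERDICT (by name: the statement is the Claim_ definition above) =====
theorem solution_spec : Claim_equal_solution := by
  intro hp _
  unfold Spec_solution solution solution_alt
  rw [PySem.Int.mod_eq_emod_of_pos (by norm_num : (0:Int) < 15),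
      pvTable_lookup _ (Int.emod_nonneg hp (by norm_num)) (by omega)]
  by_cases h : hp = 0
  · subst h; decide
  · simp only [h, if_false, List.foldl,
      PySem.Int.mod_eq_emod_of_pos (show (0:Int) < 5 by norm_num),
      PySem.Int.mod_eq_emod_of_pos (show (0:Int) < 3 by norm_num),
      PySem.Int.mod_eq_emod_of_pos (show (0:Int) < 1 by norm_num),
      PySem.Int.floordiv_eq_ediv_of_pos (show (0:Int) < 5 by norm_num),
      PySem.Int.floordiv_eq_ediv_of_pos (show (0:Int) < 3 by norm_num),
      PySem.Int.floordiv_eq_ediv_of_pos (show (0:Int) < 1 by norm_num)]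
    omega
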